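-- pv_equiv track=rewrite | github.com/daeni-dang/Baekjoon_with_python | Programmers/짝꿍.py | solution
-- ===== SOURCE A (Python) =====
-- def solution(X, Y):
--     answer = ''
--     answer_tmp = []
--     x_tmp = [0] * 10
--     y_tmp = [0] * 10
--     for i in X:
--         x_tmp[int(i)] += 1
--     for i in Y:
--         y_tmp[int(i)] += 1
--     for i in range(10):
--         if x_tmp[i] != 0 and y_tmp[i] != 0:
--             for j in range(min(x_tmp[i], y_tmp[i])):
--                 answer_tmp.append(str(i))
--     if len(answer_tmp) == 0:
--         answer_tmp.append('-1')
--     count_zero = 0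
--     for i in range(len(answer_tmp)):
--         if answer_tmp[i] == '0':
--             count_zero += 1
--     if count_zero == len(answer_tmp):
--         answer_tmp.remove('0')
--     answer_tmp.sort(reverse=True)
--     answer = ''.join(answer_tmp)
--     return answer
-- ===== SOURCE B (Python) =====
-- def solution(X, Y):
--     xs = sorted(map(int, X))
--     ys = sorted(map(int, Y))
--     common = []
--     i = 0
--     j = 0
--     while i < len(xs) and j < len(ys):
--         if xs[i] == ys[j]:
--             common.append(xs[i])
--             i += 1
--             j += 1
--         elif xs[i] < ys[j]:
--             i += 1
--         else:
--             j += 1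
--     if not common:
--         return '-1'
--     if common[-1] == 0:  # ascending, so last == 0 means every common digit is 0
--         common.pop()
--     return ''.join(str(d) for d in reversed(common))
-- ===== Notes on version B (the rewrite author's own statement) =====
-- stated objective: alternative
-- what changed: Replaces the ten-bucket frequency counting plus zero-counting pass plus final reverse sort by converting each string to a sorted list of digit values and two-pointer merging the two lists into the ascending common multiset, which is emitted by a single reversal (no final sort: the last element alone tells whether all common digits are zero).
import Mathlib
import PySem

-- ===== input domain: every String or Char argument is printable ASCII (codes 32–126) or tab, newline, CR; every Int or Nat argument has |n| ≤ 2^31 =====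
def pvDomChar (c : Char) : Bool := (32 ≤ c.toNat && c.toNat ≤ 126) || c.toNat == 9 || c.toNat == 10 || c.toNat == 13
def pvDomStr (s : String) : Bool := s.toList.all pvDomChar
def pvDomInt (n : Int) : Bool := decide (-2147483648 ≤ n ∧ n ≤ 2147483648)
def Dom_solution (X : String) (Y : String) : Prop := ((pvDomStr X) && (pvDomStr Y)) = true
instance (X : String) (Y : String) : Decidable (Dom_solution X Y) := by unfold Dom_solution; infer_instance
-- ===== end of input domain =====

-- B replaces A's ten-bucket digit counting (plus a zero-counting pass and a final
-- descending sort) by sort-both-digit-lists + two-pointer merge, emitted by one reversal.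

-- ===== PORT A =====
-- x_tmp[int(i)] += 1  (int(i) raises ValueError on a non-digit character: excluded by Pre_)
def pvBumpA (t : List Int) (c : Char) : List Int :=
  match PySem.Int.ofStr? (String.ofList [c]) with
  | none => t
  | some d => PySem.List.pySetD t d (PySem.List.pyGetD t d 0 + 1)

def solution (X : String) (Y : String) : String :=
  let x_tmp := X.toList.foldl pvBumpA (List.replicate 10 (0 : Int))
  let y_tmp := Y.toList.foldl pvBumpA (List.replicate 10 (0 : Int))
  let answer_tmp := (PySem.List.pyRange 0 10 1).foldl (fun acc i =>
      if PySem.List.pyGetD x_tmp i 0 ≠ 0 ∧ PySem.List.pyGetD y_tmp i 0 ≠ 0 then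
        (PySem.List.pyRange 0 (min (PySem.List.pyGetD x_tmp i 0) (PySem.List.pyGetD y_tmp i 0)) 1).foldl
          (fun a _ => a ++ [PySem.Int.toStr i]) acc
      else acc) ([] : List String)
  let answer_tmp := if answer_tmp.length = 0 then answer_tmp ++ ["-1"] else answer_tmp
  let count_zero := answer_tmp.foldl (fun n s => if s = "0" then n + 1 else n) (0 : Int)
  let answer_tmp := if count_zero = (answer_tmp.length : Int) then
      (PySem.List.remove? answer_tmp "0").getD answer_tmp else answer_tmp
  PySem.Str.join "" (PySem.List.sorted answer_tmp (fun s => s) true)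

-- ===== PORT B =====
-- int(c) for one character (ValueError — none — on a non-digit: excluded by Pre_)
def pvToDigit (c : Char) : Int :=
  (PySem.Int.ofStr? (String.ofList [c])).getD 0

-- fuel = |xs| + |ys| makes the two-pointer while-loop structurally recursive (totality only)
def mergeCommonAux : Nat → List Int → List Int → List Int
  | 0, _, _ => []
  | _ + 1, [], _ => []
  | _ + 1, _ :: _, [] => []
  | n + 1, x :: xs, y :: ys =>
    if x = y then x :: mergeCommonAux n xs ys
    else if x < y then mergeCommonAux n xs (y :: ys)
    else mergeCommonAux n (x :: xs) ys

def mergeCommon (xs ys : List Int) : List Int :=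
  mergeCommonAux (xs.length + ys.length) xs ys

def solution_alt (X : String) (Y : String) : String :=
  let xs := PySem.List.sorted (X.toList.map pvToDigit) (fun d => d) false
  let ys := PySem.List.sorted (Y.toList.map pvToDigit) (fun d => d) false
  let common := mergeCommon xs ys
  if common.isEmpty then "-1"
  else
    let common := if common.getLast? = some 0 then common.dropLast else common
    PySem.Str.join "" (common.reverse.map PySem.Int.toStr)

-- ===== PRECONDITION & SPEC =====
-- Pre_: every character of X and Y is a decimal digit — exactly the inputs where int(i) does not raise.
def Pre_solution (X : String) (Y : String) : Prop :=
  (X.toList.all PySem.Chars.isdigit && Y.toList.all PySem.Chars.isdigit) = true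
instance (X : String) (Y : String) : Decidable (Pre_solution X Y) := by
  unfold Pre_solution; infer_instance
def pvWitness_solution : String × String := ("112", "210")

def Spec_solution (X : String) (Y : String) (out : String) : Prop := out = solution_alt X Y
instance (X : String) (Y : String) (out : String) : Decidable (Spec_solution X Y out) := by
  unfold Spec_solution; infer_instance

-- ===== CLAIM (what is proved, stated in full; the proofs are below) =====
def Claim_equal_solution : Prop := ∀ (X : String) (Y : String),
  Dom_solution X Y → Pre_solution X Y → Spec_solution X Y (solution X Y)

-- ===== LEMMAS AND PROOFS =====

-- the digit character for i (i < 10)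
def dch (i : Nat) : Char := Char.ofNat (48 + i)
-- the single-character string str(i) builds
def s2l (c : Char) : String := String.ofList [c]

lemma isdigit_toNat {c : Char} (h : PySem.Chars.isdigit c = true) :
    48 ≤ c.toNat ∧ c.toNat ≤ 57 := by
  simp [PySem.Chars.isdigit, Char.le_def, UInt32.le_iff_toNat_le] at h
  exact h

lemma digit_exists {c : Char} (h : PySem.Chars.isdigit c = true) : ∃ i, i < 10 ∧ c = dch i := by
  obtain ⟨h1, h2⟩ := isdigit_toNat h
  refine ⟨c.toNat - 48, by omega, ?_⟩
  have : 48 + (c.toNat - 48) = c.toNat := by omega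
  rw [dch, this, Char.ofNat_toNat]

lemma dch_inj {i j : Nat} (hi : i < 10) (hj : j < 10) (h : dch i = dch j) : i = j := by
  interval_cases i <;> interval_cases j <;> simp_all <;> revert h <;> decide

lemma dch_le {i j : Nat} (hij : i ≤ j) (hj : j < 10) : dch i ≤ dch j := by
  have hi : i < 10 := by omega
  interval_cases i <;> interval_cases j <;> first | rfl | decide

lemma dch_toNat {i : Nat} (hi : i < 10) : (dch i).toNat = 48 + i := by
  interval_cases i <;> decide

lemma ofStr?_digit {c : Char} (h : PySem.Chars.isdigit c = true) :
    PySem.Int.ofStr? (String.ofList [c]) = some ((c.toNat : Int) - 48) := by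
  obtain ⟨i, hi, rfl⟩ := digit_exists h
  interval_cases i <;> decide

lemma pvToDigit_dch {i : Nat} (hi : i < 10) : pvToDigit (dch i) = (i : Int) := by
  interval_cases i <;> decide

lemma s2l_mono {c d : Char} (h : c ≤ d) : s2l c ≤ s2l d := by
  rcases eq_or_lt_of_le h with rfl | hlt
  · exact le_refl _
  · exact le_of_lt (by rw [String.lt_iff_toList_lt]; simpa [s2l] using List.Lex.rel hlt)

lemma toStr_dch {i : Nat} (hi : i < 10) : PySem.Int.toStr (i : Int) = s2l (dch i) := by
  interval_cases i <;> decide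

lemma pvBumpA_digit {c : Char} (h : PySem.Chars.isdigit c = true) {j : Nat} (hj : j < 10)
    (hc : c = dch j) (t : List Int) (ht : t.length = 10) :
    pvBumpA t c = t.set j (t.getD j 0 + 1) := by
  have hv : (c.toNat : Int) - 48 = (j : Int) := by
    have := dch_toNat hj; subst hc; omega
  rw [pvBumpA, ofStr?_digit h, hv]
  simp [PySem.List.pySetD, PySem.List.pySet?, PySem.List.pyIdx?, ht, hj,
    List.getD_eq_getElem?_getD, PySem.List.pyGetD_natCast]

-- invariant of A's counting loops: bucket i holds the number of occurrences of digit i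
lemma bump_fold (l : List Char) (hl : ∀ c ∈ l, PySem.Chars.isdigit c = true)
    (t : List Int) (ht : t.length = 10) :
    (l.foldl pvBumpA t).length = 10 ∧ ∀ i : Nat, i < 10 →
      (l.foldl pvBumpA t).getD i 0 = t.getD i 0 + (l.count (dch i) : Int) := by
  induction l generalizing t with
  | nil => simp [ht]
  | cons c l ih =>
    have hc := hl c (by simp)
    obtain ⟨j, hj, hcj⟩ := digit_exists hc
    have hstep := pvBumpA_digit hc hj hcj t ht
    have ht2 : (t.set j (t.getD j 0 + 1)).length = 10 := by simp [ht]
    obtain ⟨hlen, hcnt⟩ := ih (fun c hc => hl c (by simp [hc])) _ ht2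
    rw [List.foldl_cons, hstep]
    refine ⟨hlen, fun i hi => ?_⟩
    rw [hcnt i hi]
    have hget : (t.set j (t.getD j 0 + 1)).getD i 0 =
        if j = i then t.getD j 0 + 1 else t.getD i 0 := by
      simp [List.getD_eq_getElem?_getD, List.getElem?_set, ht, hj]
      split <;> simp_all
    rw [hget]
    by_cases hij : j = i
    · subst hij; subst hcj
      simp
      omega
    · have : dch i ≠ c := by
        subst hcj; intro h; exact hij (dch_inj hj hi h.symm)
      simp [this.symm, hij]

-- the inner 'for j in range(m): answer_tmp.append(str(i))' loop
lemma appendConstFold (L : List Int) (acc : List String) (s : String) :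
    L.foldl (fun a _ => a ++ [s]) acc = acc ++ List.replicate L.length s := by
  induction L generalizing acc with
  | nil => simp
  | cons x L ih => simp [List.foldl_cons, ih, List.replicate_succ]

-- ---- two-pointer merge: subset / sortedness / counts ----
lemma mergeAux_subset (n : Nat) (xs ys : List Int) : mergeCommonAux n xs ys ⊆ xs := by
  induction n generalizing xs ys with
  | zero => simp [mergeCommonAux]
  | succ n ih =>
    match xs, ys with
    | [], _ => simp [mergeCommonAux]
    | _ :: _, [] => simp [mergeCommonAux]
    | x :: xs, y :: ys =>
      rw [mergeCommonAux]
      split_ifs with h1 h2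
      · exact List.cons_subset_cons x (ih xs ys)
      · exact (ih xs (y :: ys)).trans (List.subset_cons_self x xs)
      · exact ih (x :: xs) ys

lemma mergeAux_pairwise (n : Nat) (xs ys : List Int)
    (hx : xs.Pairwise (· ≤ ·)) (hy : ys.Pairwise (· ≤ ·)) :
    (mergeCommonAux n xs ys).Pairwise (· ≤ ·) := by
  induction n generalizing xs ys with
  | zero => simp [mergeCommonAux]
  | succ n ih =>
    match xs, ys with
    | [], _ => simp [mergeCommonAux]
    | _ :: _, [] => simp [mergeCommonAux]
    | x :: xs, y :: ys =>
      rw [mergeCommonAux]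
      rw [List.pairwise_cons] at hx hy
      split_ifs with h1 h2
      · exact List.Pairwise.cons
          (fun z hz => hx.1 z (mergeAux_subset n xs ys hz)) (ih xs ys hx.2 hy.2)
      · exact ih xs (y :: ys) hx.2 (List.pairwise_cons.mpr hy)
      · exact ih (x :: xs) ys (List.pairwise_cons.mpr hx) hy.2

lemma not_mem_of_lt_head {x y : Int} {ys : List Int}
    (hy : (y :: ys).Pairwise (· ≤ ·)) (hxy : x < y) : x ∉ y :: ys := by
  rw [List.pairwise_cons] at hy
  intro hm
  rcases List.mem_cons.mp hm with rfl | hm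
  · exact absurd rfl (ne_of_lt hxy)
  · exact absurd (hxy.trans_le (hy.1 _ hm)) (lt_irrefl x)

lemma mergeAux_count (n : Nat) (xs ys : List Int) (hn : xs.length + ys.length ≤ n)
    (hx : xs.Pairwise (· ≤ ·)) (hy : ys.Pairwise (· ≤ ·)) (c : Int) :
    (mergeCommonAux n xs ys).count c = min (xs.count c) (ys.count c) := by
  induction n generalizing xs ys with
  | zero =>
    have : xs = [] := by cases xs <;> simp_all
    subst this; simp [mergeCommonAux]
  | succ n ih =>
    match xs, ys with
    | [], _ => simp [mergeCommonAux]
    | _ :: _, [] => simp [mergeCommonAux]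
    | x :: xs, y :: ys =>
      rw [mergeCommonAux]
      simp only [List.length_cons] at hn
      split_ifs with h1 h2
      · subst h1
        rw [List.count_cons, List.count_cons, List.count_cons,
          ih xs ys (by omega) (List.pairwise_cons.mp hx).2 (List.pairwise_cons.mp hy).2]
        split_ifs <;> omega
      · rw [ih xs (y :: ys) (by simp; omega) (List.pairwise_cons.mp hx).2 hy]
        by_cases hcx : c = x
        · subst hcx
          have h0 : (y :: ys).count c = 0 := List.count_eq_zero.mpr (not_mem_of_lt_head hy h2)
          simp [h0, List.count_cons_self]
        · rw [List.count_cons_of_ne (Ne.symm hcx)]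
      · have hyx : y < x := by
          rcases lt_trichotomy x y with h | h | h
          · exact absurd h h2
          · exact absurd h h1
          · exact h
        rw [ih (x :: xs) ys (by simp; omega) hx (List.pairwise_cons.mp hy).2]
        by_cases hcy : c = y
        · subst hcy
          have h0 : (x :: xs).count c = 0 := List.count_eq_zero.mpr (not_mem_of_lt_head hx hyx)
          simp [h0]
        · rw [List.count_cons_of_ne (Ne.symm hcy)]

-- ---- the ascending common-digit block list (character / integer form) ----
lemma mem_flatMap_replicate_dch {g : Nat → Nat} {n : Nat} {c : Char}
    (h : c ∈ (List.range n).flatMap (fun j => List.replicate (g j) (dch j))) :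
    ∃ j, j < n ∧ c = dch j := by
  obtain ⟨j, hj, hc⟩ := List.mem_flatMap.mp h
  exact ⟨j, List.mem_range.mp hj, List.eq_of_mem_replicate hc⟩

lemma pairwise_flatMap_replicate_dch (g : Nat → Nat) {n : Nat} (hn : n ≤ 10) :
    ((List.range n).flatMap (fun j => List.replicate (g j) (dch j))).Pairwise (· ≤ ·) := by
  induction n with
  | zero => simp
  | succ n ih =>
    rw [List.range_succ, List.flatMap_append]
    simp only [List.flatMap_cons, List.flatMap_nil, List.append_nil]
    rw [List.pairwise_append]
    refine ⟨ih (by omega), List.pairwise_replicate.mpr (Or.inr (le_refl _)), ?_⟩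
    intro a ha b hb
    obtain ⟨j, hj, rfl⟩ := mem_flatMap_replicate_dch ha
    rw [List.eq_of_mem_replicate hb]
    exact dch_le (by omega) (by omega)

lemma mem_flatMap_replicate_int {g : Nat → Nat} {n : Nat} {q : Int}
    (h : q ∈ (List.range n).flatMap (fun j => List.replicate (g j) ((j : Nat) : Int))) :
    ∃ j, j < n ∧ q = (j : Int) := by
  obtain ⟨j, hj, hc⟩ := List.mem_flatMap.mp h
  exact ⟨j, List.mem_range.mp hj, List.eq_of_mem_replicate hc⟩

lemma count_flatMap_replicate_int (g : Nat → Nat) {n i : Nat} (hi : i < n) :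
    ((List.range n).flatMap (fun j => List.replicate (g j) ((j : Nat) : Int))).count ((i : Nat) : Int) = g i := by
  induction n with
  | zero => omega
  | succ n ih =>
    rw [List.range_succ, List.flatMap_append]
    simp only [List.flatMap_cons, List.flatMap_nil, List.append_nil, List.count_append,
      List.count_replicate]
    by_cases hin : i = n
    · subst hin
      have h0 : ((List.range i).flatMap (fun j => List.replicate (g j) ((j : Nat) : Int))).count ((i : Nat) : Int) = 0 := by
        rw [List.count_eq_zero]
        intro hmem
        obtain ⟨j, hj, hc⟩ := mem_flatMap_replicate_int hmem
        exact absurd (by exact_mod_cast hc : (i : Nat) = j) (by omega)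
      simp [h0]
    · have hne : (((n : Nat) : Int) == ((i : Nat) : Int)) = false := by
        simp only [beq_eq_false_iff_ne, ne_eq, Nat.cast_inj]
        omega
      rw [ih (by omega), hne]
      simp

lemma count_flatMap_replicate_int_out (g : Nat → Nat) {n : Nat} {q : Int}
    (hq : ∀ j, j < n → q ≠ (j : Int)) :
    ((List.range n).flatMap (fun j => List.replicate (g j) ((j : Nat) : Int))).count q = 0 := by
  rw [List.count_eq_zero]
  intro hmem
  obtain ⟨j, hj, hc⟩ := mem_flatMap_replicate_int hmem
  exact hq j hj hc

lemma pairwise_flatMap_replicate_int (g : Nat → Nat) {n : Nat} :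
    ((List.range n).flatMap (fun j => List.replicate (g j) ((j : Nat) : Int))).Pairwise (· ≤ ·) := by
  induction n with
  | zero => simp
  | succ n ih =>
    rw [List.range_succ, List.flatMap_append]
    simp only [List.flatMap_cons, List.flatMap_nil, List.append_nil]
    rw [List.pairwise_append]
    refine ⟨ih, List.pairwise_replicate.mpr (Or.inr (le_refl _)), ?_⟩
    intro a ha b hb
    obtain ⟨j, hj, rfl⟩ := mem_flatMap_replicate_int ha
    rw [List.eq_of_mem_replicate hb]
    exact_mod_cast Nat.le_of_lt hj

lemma flatMap_range_congr {α : Type} (n : Nat) (f g : Nat → List α)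
    (h : ∀ j, j < n → f j = g j) :
    (List.range n).flatMap f = (List.range n).flatMap g := by
  induction n with
  | zero => simp
  | succ n ih =>
    rw [List.range_succ, List.flatMap_append, List.flatMap_append,
      ih (fun j hj => h j (by omega))]
    simp [h n (by omega)]

-- int(c) of a digit character counts like the character itself
lemma count_map_digit (l : List Char) (hl : ∀ c ∈ l, PySem.Chars.isdigit c = true)
    {i : Nat} (hi : i < 10) :
    (l.map pvToDigit).count ((i : Nat) : Int) = l.count (dch i) := by
  induction l with
  | nil => simp
  | cons c l ih =>
    obtain ⟨j, hj, rfl⟩ := digit_exists (hl c (by simp))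
    rw [List.map_cons, List.count_cons, List.count_cons,
      ih (fun c hc => hl c (by simp [hc])), pvToDigit_dch hj]
    by_cases hij : j = i
    · subst hij; simp
    · have h1 : (((j : Nat) : Int) == ((i : Nat) : Int)) = false := by
        simp only [beq_eq_false_iff_ne, ne_eq, Nat.cast_inj]; omega
      have h2 : (dch j == dch i) = false := by
        simp only [beq_eq_false_iff_ne, ne_eq]
        intro h; exact hij (dch_inj hj hi h)
      rw [h1, h2]

-- A's ten-bucket loop emits exactly the ascending common-digit blocks (as one-digit strings)
lemma a1_eq (X Y : String) (hX : ∀ c ∈ X.toList, PySem.Chars.isdigit c = true)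
    (hY : ∀ c ∈ Y.toList, PySem.Chars.isdigit c = true) :
    ((PySem.List.pyRange 0 10 1).foldl (fun acc i =>
      if PySem.List.pyGetD (X.toList.foldl pvBumpA (List.replicate 10 (0:Int))) i 0 ≠ 0 ∧
         PySem.List.pyGetD (Y.toList.foldl pvBumpA (List.replicate 10 (0:Int))) i 0 ≠ 0 then
        (PySem.List.pyRange 0 (min (PySem.List.pyGetD (X.toList.foldl pvBumpA (List.replicate 10 (0:Int))) i 0)
            (PySem.List.pyGetD (Y.toList.foldl pvBumpA (List.replicate 10 (0:Int))) i 0)) 1).foldl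
          (fun a _ => a ++ [PySem.Int.toStr i]) acc
      else acc) ([] : List String)) =
    ((List.range 10).flatMap (fun j =>
      List.replicate (min (X.toList.count (dch j)) (Y.toList.count (dch j))) (dch j))).map s2l := by
  obtain ⟨hxl, hxg⟩ := bump_fold X.toList hX (List.replicate 10 0) (by simp)
  obtain ⟨hyl, hyg⟩ := bump_fold Y.toList hY (List.replicate 10 0) (by simp)
  set xt := X.toList.foldl pvBumpA (List.replicate 10 (0:Int)) with hxt
  set yt := Y.toList.foldl pvBumpA (List.replicate 10 (0:Int)) with hyt
  have hgx : ∀ k : Nat, k < 10 → PySem.List.pyGetD xt (k : Int) 0 = (X.toList.count (dch k) : Int) := by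
    intro k hk
    rw [PySem.List.pyGetD_natCast]
    have h0 : (List.replicate 10 (0:Int)).getD k 0 = 0 := by
      simp [List.getD_eq_getElem?_getD, hk]; interval_cases k <;> rfl
    have := hxg k hk
    rw [h0] at this
    simpa using this
  have hgy : ∀ k : Nat, k < 10 → PySem.List.pyGetD yt (k : Int) 0 = (Y.toList.count (dch k) : Int) := by
    intro k hk
    rw [PySem.List.pyGetD_natCast]
    have h0 : (List.replicate 10 (0:Int)).getD k 0 = 0 := by
      simp [List.getD_eq_getElem?_getD, hk]; interval_cases k <;> rfl
    have := hyg k hk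
    rw [h0] at this
    simpa using this
  rw [PySem.List.pyRange_one]
  simp only [List.foldl_map]
  rw [PySem.List.foldl_congr_mem _ _
    (fun acc (k : Nat) => acc ++ List.replicate (min (X.toList.count (dch k)) (Y.toList.count (dch k))) (s2l (dch k))) _ ?_]
  · rw [PySem.List.foldl_append_eq_flatMap]
    simp [List.map_flatMap]
  · intro acc k hk
    have hk10 : k < 10 := by simpa using List.mem_range.mp (by simpa using hk)
    simp only [zero_add]
    rw [hgx k hk10, hgy k hk10]
    by_cases hP : (X.toList.count (dch k) : Int) ≠ 0 ∧ (Y.toList.count (dch k) : Int) ≠ 0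
    · rw [if_pos hP, appendConstFold, PySem.List.length_pyRange_one, toStr_dch hk10]
      congr 1
      congr 1
      omega
    · rw [if_neg hP]
      have : min (X.toList.count (dch k)) (Y.toList.count (dch k)) = 0 := by
        push Not at hP
        omega
      simp [this]

-- B's merge of the two sorted digit lists is the same block list, as integers
lemma common_eq (X Y : String) (hX : ∀ c ∈ X.toList, PySem.Chars.isdigit c = true)
    (hY : ∀ c ∈ Y.toList, PySem.Chars.isdigit c = true) :
    mergeCommon (PySem.List.sorted (X.toList.map pvToDigit) (fun d => d) false)
        (PySem.List.sorted (Y.toList.map pvToDigit) (fun d => d) false) =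
    ((List.range 10).flatMap (fun j =>
      List.replicate (min (X.toList.count (dch j)) (Y.toList.count (dch j))) (dch j))).map pvToDigit := by
  have hrng : ∀ (l : List Char), (∀ c ∈ l, PySem.Chars.isdigit c = true) →
      ∀ q ∈ l.map pvToDigit, ∃ j : Nat, j < 10 ∧ q = (j : Int) := by
    intro l hl q hq
    obtain ⟨c, hc, rfl⟩ := List.mem_map.mp hq
    obtain ⟨j, hj, rfl⟩ := digit_exists (hl c hc)
    exact ⟨j, hj, pvToDigit_dch hj⟩
  have hRHS : ((List.range 10).flatMap (fun j =>
      List.replicate (min (X.toList.count (dch j)) (Y.toList.count (dch j))) (dch j))).map pvToDigit =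
      (List.range 10).flatMap (fun j =>
        List.replicate (min (X.toList.count (dch j)) (Y.toList.count (dch j))) ((j : Nat) : Int)) := by
    rw [List.map_flatMap]
    exact flatMap_range_congr 10 _ _ (fun j hj => by rw [List.map_replicate, pvToDigit_dch hj])
  rw [hRHS]
  set sx := PySem.List.sorted (X.toList.map pvToDigit) (fun d => d) false with hsx
  set sy := PySem.List.sorted (Y.toList.map pvToDigit) (fun d => d) false with hsy
  have hpx : sx.Pairwise (· ≤ ·) := PySem.List.sorted_pairwise (X.toList.map pvToDigit) (fun d => d)
  have hpy : sy.Pairwise (· ≤ ·) := PySem.List.sorted_pairwise (Y.toList.map pvToDigit) (fun d => d)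
  have hcx : ∀ q, sx.count q = (X.toList.map pvToDigit).count q :=
    fun q => (PySem.List.sorted_perm (X.toList.map pvToDigit) (fun d => d) false).count_eq q
  have hcy : ∀ q, sy.count q = (Y.toList.map pvToDigit).count q :=
    fun q => (PySem.List.sorted_perm (Y.toList.map pvToDigit) (fun d => d) false).count_eq q
  apply PySem.List.eq_of_perm_of_pairwise_le_of_injective (fun d => d) (fun a b h => h)
  · rw [List.perm_iff_count]
    intro q
    rw [mergeCommon, mergeAux_count _ _ _ (le_refl _) hpx hpy, hcx, hcy]
    by_cases hd : ∃ j : Nat, j < 10 ∧ q = (j : Int)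
    · obtain ⟨j, hj, rfl⟩ := hd
      rw [count_flatMap_replicate_int _ hj, count_map_digit X.toList hX hj,
        count_map_digit Y.toList hY hj]
    · push Not at hd
      have h0x : (X.toList.map pvToDigit).count q = 0 := by
        rw [List.count_eq_zero]
        intro hm
        obtain ⟨j, hj, hq⟩ := hrng X.toList hX q hm
        exact hd j hj hq
      rw [count_flatMap_replicate_int_out _ (fun j hj hq => hd j hj hq), h0x]
      simp
  · exact mergeAux_pairwise _ _ _ hpx hpy
  · exact pairwise_flatMap_replicate_int _

lemma le_getLast_of_pairwise {l : List Char} (hp : l.Pairwise (· ≤ ·)) {x : Char}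
    (hx : x ∈ l) (h : l ≠ []) : x ≤ l.getLast h := by
  induction l with
  | nil => exact absurd rfl h
  | cons a l ih =>
    rw [List.pairwise_cons] at hp
    rcases List.mem_cons.mp hx with rfl | hx
    · cases l with
      | nil => simp [List.getLast]
      | cons b t =>
        rw [List.getLast_cons (by simp)]
        exact hp.1 _ (List.getLast_mem _)
    · have hl : l ≠ [] := List.ne_nil_of_mem hx
      rw [List.getLast_cons hl]
      exact ih hp.2 hx hl

lemma sorted_rev_eq_reverse (l : List String) (hp : l.Pairwise (· ≤ ·)) :
    PySem.List.sorted l (fun s => s) true = l.reverse := by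
  have h1 : (PySem.List.sorted l (fun s => s) true).reverse = l := by
    apply PySem.List.eq_of_perm_of_pairwise_le_of_injective (fun s => s) (fun a b h => h)
    · exact (List.reverse_perm _).trans (PySem.List.sorted_perm _ _ _)
    · exact List.pairwise_reverse.mpr (PySem.List.sorted_pairwise_rev l (fun s => s))
    · exact hp
  have h2 := congrArg List.reverse h1
  rwa [List.reverse_reverse] at h2

-- ===== VERDICT (by name: the statement is the Claim_ definition above) =====
theorem solution_spec : Claim_equal_solution := by
  intro X Y _ hpre
  rw [Pre_solution, Bool.and_eq_true, List.all_eq_true, List.all_eq_true] at hpre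
  obtain ⟨hX, hY⟩ := hpre
  rw [Spec_solution]
  simp only [solution, solution_alt]
  rw [a1_eq X Y hX hY, common_eq X Y hX hY]
  set cm := (List.range 10).flatMap (fun j =>
      List.replicate (min (X.toList.count (dch j)) (Y.toList.count (dch j))) (dch j)) with hcm
  have hpw : cm.Pairwise (· ≤ ·) := pairwise_flatMap_replicate_dch _ (le_refl _)
  by_cases hnil : cm = []
  · rw [hnil]
    decide
  · -- non-empty common list
    have hlen : (cm.map s2l).length ≠ 0 := by simpa using hnil
    have hbne : ¬ (cm.map pvToDigit).isEmpty = true := by simpa using hnil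
    rw [if_neg hlen, if_neg hbne]
    simp only [List.length_map]
    -- the zero-count loop counts the "0" entries
    have hcz : (cm.map s2l).foldl (fun n s => if s = "0" then n + 1 else n) (0 : Int) =
        ((cm.map s2l).count "0" : Int) := by
      rw [PySem.List.foldl_ite_add_one (fun s => s = "0") (cm.map s2l) 0]
      simp only [zero_add, Int.natCast_inj]
      rw [List.count_eq_countP]
      refine List.countP_congr (fun a _ => ?_)
      by_cases h : a = "0"
      · subst h; simp
      · simp [h]
    have hcnt_map : (cm.map s2l).count "0" = cm.count '0' := by
      have : ("0" : String) = s2l '0' := rfl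
      rw [this]
      exact List.count_map_of_injective _ s2l (fun a b h => by
        simpa [s2l] using congrArg String.toList h) '0'
    by_cases hz : cm.count '0' = cm.length
    · -- all common digits are '0'
      have hall : ∀ b ∈ cm, b = '0' := fun b hb => (List.count_eq_length.mp hz b hb).symm
      have hrep : cm = List.replicate cm.length '0' := List.eq_replicate_of_mem hall
      obtain ⟨m, hm⟩ : ∃ m, cm.length = m + 1 := by
        cases h : cm.length with
        | zero => exact absurd (List.length_eq_zero_iff.mp h) hnil
        | succ m => exact ⟨m, rfl⟩
      have hcond : (cm.map s2l).foldl (fun n s => if s = "0" then n + 1 else n) (0 : Int) =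
          ((cm.length : Nat) : Int) := by
        rw [hcz, hcnt_map, hz]
      rw [if_pos hcond]
      have hmap : cm.map s2l = List.replicate (m + 1) "0" := by
        rw [hrep, hm, List.map_replicate]; rfl
      rw [hmap, List.replicate_succ, PySem.List.remove?_cons_self]
      simp only [Option.getD_some]
      rw [PySem.List.sorted_rev_eq_self_of_pairwise _ (fun s => s)
        (by rw [List.pairwise_replicate]; exact Or.inr (le_refl _))]
      -- B side
      have hmapi : cm.map pvToDigit = List.replicate (m + 1) (0 : Int) := by
        rw [hrep, hm, List.map_replicate]
        rfl
      rw [hmapi]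
      have hlast : (List.replicate (m + 1) (0 : Int)).getLast? = some 0 := by
        simp [List.getLast?_replicate]
      rw [if_pos hlast, List.dropLast_replicate]
      simp only [Nat.add_sub_cancel, List.reverse_replicate, List.map_replicate]
      rfl
    · -- some common digit is non-zero
      have hcond : ¬ ((cm.map s2l).foldl (fun n s => if s = "0" then n + 1 else n) (0 : Int) =
          ((cm.length : Nat) : Int)) := by
        rw [hcz, hcnt_map]
        exact_mod_cast hz
      rw [if_neg hcond]
      have hpws : (cm.map s2l).Pairwise (· ≤ ·) := by
        rw [List.pairwise_map]
        exact hpw.imp (fun h => s2l_mono h)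
      rw [sorted_rev_eq_reverse _ hpws, ← List.map_reverse]
      -- B side: the last merged digit is not 0
      have hlast : ¬ (cm.map pvToDigit).getLast? = some 0 := by
        intro h
        rw [List.getLast?_map] at h
        rw [List.getLast?_eq_some_getLast hnil] at h
        have hg : pvToDigit (cm.getLast hnil) = 0 := by
          simpa using h
        apply hz
        rw [List.count_eq_length]
        intro b hb
        have h0 : cm.getLast hnil = '0' := by
          have hmem : cm.getLast hnil ∈ cm := List.getLast_mem hnil
          obtain ⟨j, hj, hcj⟩ := mem_flatMap_replicate_dch (by rw [← hcm]; exact hmem)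
          rw [hcj, pvToDigit_dch hj] at hg
          have hj0 : j = 0 := by exact_mod_cast hg
          rw [hcj, hj0]
          rfl
        have h1 : b ≤ cm.getLast hnil := le_getLast_of_pairwise hpw hb hnil
        have h2 : dch 0 ≤ b := by
          obtain ⟨j, hj, rfl⟩ := mem_flatMap_replicate_dch (hcm ▸ hb)
          exact dch_le (Nat.zero_le _) hj
        rw [h0] at h1
        have h3 : dch 0 = '0' := rfl
        rw [h3] at h2
        exact le_antisymm h2 h1
      rw [if_neg hlast, ← List.map_reverse, List.map_map]
      congr 1
      apply List.map_congr_left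
      intro c hc
      obtain ⟨j, hj, rfl⟩ := mem_flatMap_replicate_dch (hcm ▸ (List.mem_reverse.mp hc))
      simp only [Function.comp_apply]
      rw [pvToDigit_dch hj, toStr_dch hj]
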